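-- pv_equiv track=rewrite | github.com/sl45sms/glossApi-tokenizer | vocabularyGen/countQuotedWords.py | iter_words
-- ===== SOURCE A (Python) =====
-- from typing import Dict, Iterable, Iterator
--
-- WORD_CONNECTORS = {"'", "-"}
--
-- def iter_words(text: str) -> Iterator[str]:
-- 	current = []
-- 	previous_was_letter = False
--
-- 	for char in text:
-- 		if char.isalpha():
-- 			current.append(char)
-- 			previous_was_letter = True
-- 			continue
--
-- 		if current and previous_was_letter and char in WORD_CONNECTORS:
-- 			current.append(char)
-- 			previous_was_letter = False
-- 			continue
--
-- 		if current:
-- 			if current[-1] in WORD_CONNECTORS: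
-- 				current.pop()
-- 			if current:
-- 				yield "".join(current)
-- 			current = []
-- 		previous_was_letter = False
--
-- 	if current:
-- 		if current[-1] in WORD_CONNECTORS:
-- 			current.pop()
-- 		if current:
-- 			yield "".join(current)
-- ===== SOURCE B (Python) =====
-- WORD_CONNECTORS = {"'", "-"}
--
-- def iter_words(text):
--     n = len(text)
--     i = 0
--     while i < n:
--         if not text[i].isalpha():
--             i += 1
--             continue
--         start = i
--         while i < n and (text[i].isalpha() or
--                          (text[i] in WORD_CONNECTORS and i + 1 < n and text[i + 1].isalpha())):
--             i += 1
--         yield text[start:i]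
-- ===== Notes on version B (the rewrite author's own statement) =====
-- stated objective: alternative
-- what changed: Replaced A's character-accumulator fold (current list + previous_was_letter flag + pop/flush logic) by an index-based two-pointer scan that skips non-letters, advances over letters with one-character lookahead for internal connectors, and emits each word as a slice text[start:i].
import Mathlib
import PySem

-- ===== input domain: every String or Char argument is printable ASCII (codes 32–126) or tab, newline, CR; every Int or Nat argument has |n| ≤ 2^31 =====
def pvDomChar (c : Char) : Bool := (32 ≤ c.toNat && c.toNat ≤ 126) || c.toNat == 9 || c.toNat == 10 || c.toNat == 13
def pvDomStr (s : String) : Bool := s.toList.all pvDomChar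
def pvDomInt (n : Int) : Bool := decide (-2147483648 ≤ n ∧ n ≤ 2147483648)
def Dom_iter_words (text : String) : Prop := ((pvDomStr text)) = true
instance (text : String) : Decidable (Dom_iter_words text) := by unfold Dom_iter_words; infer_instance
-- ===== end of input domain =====

-- B replaces A's accumulator/flag fold by an index-based two-pointer scan emitting slices (alternative decomposition, same cost).

-- ===== PORT A =====
-- membership in WORD_CONNECTORS = {"'", "-"}
def pvIsConn (c : Char) : Bool := c == '\'' || c == '-'

-- the trailing `if current:` flush block of A (strip one trailing connector, yield if nonempty)
def pvFlushA (cur : List Char) (out : List String) : List String :=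
  if cur.isEmpty then out
  else
    let cur2 := if pvIsConn (cur.getLastD ' ') then cur.dropLast else cur
    if cur2.isEmpty then out else out ++ [String.mk cur2]

-- A's for-loop over the characters, state (current, previous_was_letter, yielded so far)
def pvLoopA : List Char → List Char → Bool → List String → List String
  | [], cur, _, out => pvFlushA cur out
  | c :: cs, cur, prev, out =>
    if PySem.Chars.isalpha c then pvLoopA cs (cur ++ [c]) true out
    else if !cur.isEmpty && prev && pvIsConn c then pvLoopA cs (cur ++ [c]) false out
    else pvLoopA cs [] false (pvFlushA cur out)

def iter_words (text : String) : List String := pvLoopA text.toList [] false []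

-- ===== PORT B =====
-- B's inner while-condition: a letter, or a connector whose next character exists and is a letter
def pvCond (t : List Char) (n k : Nat) : Bool :=
  PySem.Chars.isalpha (t.getD k ' ') ||
    (pvIsConn (t.getD k ' ') && decide (k + 1 < n) && PySem.Chars.isalpha (t.getD (k + 1) ' '))

-- B's inner while loop: advance i while the condition holds
def pvAltInner (t : List Char) (n i : Nat) : Nat :=
  if _h : i < n then
    if pvCond t n i then pvAltInner t n (i + 1) else i
  else i
termination_by n - i

-- termination helpers for the outer loop (the port cites pvAltInner_gt by name)
theorem pvAltInner_ge (t : List Char) (n : Nat) : ∀ fuel i, n - i ≤ fuel → i ≤ pvAltInner t n i := by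
  intro fuel
  induction fuel with
  | zero =>
    intro i hi
    rw [pvAltInner]
    simp [Nat.not_lt.mpr (by omega : n ≤ i)]
  | succ m ih =>
    intro i hi
    rw [pvAltInner]
    by_cases h : i < n
    · simp only [h, dif_pos]
      by_cases hc : pvCond t n i
      · simp only [hc, if_pos]
        have := ih (i + 1) (by omega)
        omega
      · simp [hc]
    · simp [h]

theorem pvAltInner_gt (t : List Char) (n i : Nat) (h : i < n)
    (ha : PySem.Chars.isalpha (t.getD i ' ') = true) : i < pvAltInner t n i := by
  rw [pvAltInner]
  simp only [h, dif_pos, pvCond, ha, Bool.true_or, if_pos]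
  have := pvAltInner_ge t n (n - (i + 1)) (i + 1) (le_refl _)
  omega

-- B's outer while loop: skip non-letters, find the word's end j, emit the slice text[start:j]
def pvAltOuter (t : List Char) (n i : Nat) (acc : List String) : List String :=
  if h : i < n then
    if hc : PySem.Chars.isalpha (t.getD i ' ') = false then pvAltOuter t n (i + 1) acc
    else
      let j := pvAltInner t n i
      pvAltOuter t n j (acc ++ [String.mk ((t.drop i).take (j - i))])
  else acc
termination_by n - i
decreasing_by
  · omega
  · have hj := pvAltInner_gt t n i h (by simpa using hc)
    omega

def iter_words_alt (text : String) : List String :=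
  pvAltOuter text.toList text.toList.length 0 []

-- ===== PRECONDITION & SPEC =====
def Spec_iter_words (text : String) (out : List String) : Prop := out = iter_words_alt text
instance (text : String) (out : List String) : Decidable (Spec_iter_words text out) := by unfold Spec_iter_words; infer_instance

-- ===== CLAIM (what is proved, stated in full; the proofs are below) =====
def Claim_equal_iter_words : Prop := ∀ (text : String), Dom_iter_words text → Spec_iter_words text (iter_words text)

-- ===== LEMMAS AND PROOFS =====

theorem pv_conn_not_alpha (c : Char) (h : pvIsConn c = true) : PySem.Chars.isalpha c = false := by
  have hc : c = '\'' ∨ c = '-' := by simpa [pvIsConn] using h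
  rcases hc with rfl | rfl <;> decide

theorem pv_alpha_not_conn (c : Char) (h : PySem.Chars.isalpha c = true) : pvIsConn c = false := by
  by_cases hc : pvIsConn c = true
  · rw [pv_conn_not_alpha c hc] at h; cases h
  · simpa using hc

theorem pv_drop_cons (t : List Char) (i : Nat) (h : i < t.length) :
    t.drop i = t.getD i ' ' :: t.drop (i + 1) := by
  rw [List.drop_eq_getElem_cons h, List.getD_eq_getElem t ' ' h]

theorem pv_flush_nil (out : List String) : pvFlushA [] out = out := by simp [pvFlushA]

theorem pv_flush_alpha (cur : List Char) (c : Char) (out : List String)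
    (h : pvIsConn c = false) :
    pvFlushA (cur ++ [c]) out = out ++ [String.mk (cur ++ [c])] := by
  simp [pvFlushA, h]

theorem pv_flush_conn (cur : List Char) (c : Char) (out : List String)
    (h : pvIsConn c = true) (hne : cur ≠ []) :
    pvFlushA (cur ++ [c]) out = out ++ [String.mk cur] := by
  simp [pvFlushA, h, hne]

-- one step of A's loop, by branch
theorem pv_step_alpha (c : Char) (cs cur : List Char) (b : Bool) (out : List String)
    (ha : PySem.Chars.isalpha c = true) :
    pvLoopA (c :: cs) cur b out = pvLoopA cs (cur ++ [c]) true out := by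
  simp [pvLoopA, ha]

theorem pv_step_conn (c : Char) (cs cur : List Char) (out : List String)
    (ha : PySem.Chars.isalpha c = false) (hc : pvIsConn c = true) (hcur : cur ≠ []) :
    pvLoopA (c :: cs) cur true out = pvLoopA cs (cur ++ [c]) false out := by
  simp [pvLoopA, ha, hc, hcur]

theorem pv_step_break (c : Char) (cs cur : List Char) (b : Bool) (out : List String)
    (ha : PySem.Chars.isalpha c = false)
    (hnc : (!cur.isEmpty && b && pvIsConn c) = false) :
    pvLoopA (c :: cs) cur b out = pvLoopA cs [] false (pvFlushA cur out) := by
  simp [pvLoopA, ha, hnc]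

theorem pv_skip (c : Char) (cs : List Char) (b : Bool) (out : List String)
    (ha : PySem.Chars.isalpha c = false) :
    pvLoopA (c :: cs) [] b out = pvLoopA cs [] false out := by
  simp [pvLoopA, ha, pvFlushA]

theorem pvAltInner_eq (t : List Char) (n i : Nat) :
    pvAltInner t n i = if i < n then (if pvCond t n i then pvAltInner t n (i + 1) else i) else i := by
  rw [pvAltInner]
  by_cases h : i < n <;> simp [h]

theorem pvAltOuter_eq (t : List Char) (n i : Nat) (acc : List String) :
    pvAltOuter t n i acc =
      if i < n then
        (if PySem.Chars.isalpha (t.getD i ' ') = false then pvAltOuter t n (i + 1) acc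
         else pvAltOuter t n (pvAltInner t n i)
           (acc ++ [String.mk ((t.drop i).take (pvAltInner t n i - i))]))
      else acc := by
  rw [pvAltOuter]
  by_cases h : i < n
  · by_cases hc : PySem.Chars.isalpha (t.getD i ' ') = false <;> simp [h, hc]
  · simp [h]

-- the word lemma: from a letter at position k, A's fold over the suffix emits exactly the
-- slice [k, pvAltInner k) appended to the pending prefix `cur`, and resets its state
theorem pv_word (t : List Char) : ∀ (fuel k : Nat), t.length - k ≤ fuel → k < t.length →
    PySem.Chars.isalpha (t.getD k ' ') = true →
    ∀ (cur : List Char) (b : Bool) (out : List String),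
      pvLoopA (t.drop k) cur b out
        = pvLoopA (t.drop (pvAltInner t t.length k)) [] false
            (out ++ [String.mk (cur ++ (t.drop k).take (pvAltInner t t.length k - k))]) := by
  intro fuel
  induction fuel with
  | zero => intro k hf hk; omega
  | succ m ih =>
    intro k hf hk ha cur b out
    set n := t.length with hn
    set c := t.getD k ' ' with hc
    have htake1 : ∀ (x : Char) (xs : List Char), List.take (k + 1 - k) (x :: xs) = [x] := by
      intro x xs
      have h1 : k + 1 - k = 1 := by omega
      rw [h1]; rfl
    have htake1' : ∀ (x : Char) (xs : List Char) (j : Nat), k + 1 ≤ j →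
        List.take (j - k) (x :: xs) = x :: List.take (j - (k + 1)) xs := by
      intro x xs j hj
      have h1 : j - k = (j - (k + 1)) + 1 := by omega
      rw [h1, List.take_succ_cons]
    have htake2 : ∀ (x y : Char) (xs : List Char) (j : Nat), k + 2 ≤ j →
        List.take (j - k) (x :: y :: xs) = x :: y :: List.take (j - (k + 2)) xs := by
      intro x y xs j hj
      have h1 : j - k = (j - (k + 2)) + 1 + 1 := by omega
      rw [h1, List.take_succ_cons, List.take_succ_cons]
    have hcondk : pvCond t n k = true := by
      simp only [pvCond, ← hc, ha, Bool.true_or]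
    have hj1 : pvAltInner t n k = pvAltInner t n (k + 1) := by
      rw [pvAltInner_eq, if_pos hk, if_pos hcondk]
    rw [pv_drop_cons t k hk, ← hc, pv_step_alpha c _ _ _ _ ha, hj1]
    by_cases hk1 : k + 1 < n
    · set c' := t.getD (k + 1) ' ' with hc'
      by_cases ha1 : PySem.Chars.isalpha c' = true
      · -- (b) next char is a letter: recurse
        have hge : k + 1 ≤ pvAltInner t n (k + 1) :=
          pvAltInner_ge t n (n - (k + 1)) (k + 1) (le_refl _)
        rw [htake1' c _ _ hge, ih (k + 1) (by omega) hk1 ha1 (cur ++ [c]) true out,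
            pv_drop_cons t (k + 1) hk1, ← hc']
        simp
      · have ha1' : PySem.Chars.isalpha c' = false := by simpa using ha1
        have hcond1 : pvCond t n (k + 1)
            = (pvIsConn c' && decide (k + 2 < n) && PySem.Chars.isalpha (t.getD (k + 2) ' ')) := by
          simp only [pvCond, ← hc', ha1', Bool.false_or]
        by_cases hconn : pvIsConn c' = true
        · -- connector right after a letter: A appends it
          by_cases hk2 : k + 2 < n
          · set c'' := t.getD (k + 2) ' ' with hc''
            by_cases ha2 : PySem.Chars.isalpha c'' = true
            · -- (c) connector with letter lookahead: the word continues
              have hcond1' : pvCond t n (k + 1) = true := by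
                rw [hcond1, hconn, ha2]; simp [hk2]
              have hj2 : pvAltInner t n (k + 1) = pvAltInner t n (k + 2) := by
                rw [pvAltInner_eq, if_pos hk1, if_pos hcond1']
              have hge : k + 2 ≤ pvAltInner t n (k + 2) :=
                pvAltInner_ge t n (n - (k + 2)) (k + 2) (le_refl _)
              rw [hj2, pv_drop_cons t (k + 1) hk1, ← hc',
                  pv_step_conn c' _ _ _ ha1' hconn (by simp),
                  htake2 c c' _ _ hge,
                  ih (k + 2) (by omega) hk2 ha2 (cur ++ [c] ++ [c']) false out,
                  pv_drop_cons t (k + 2) hk2, ← hc'']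
              simp
            · -- (d1b) connector whose lookahead fails on a non-letter
              have ha2' : PySem.Chars.isalpha c'' = false := by simpa using ha2
              have hcond1' : pvCond t n (k + 1) = false := by
                rw [hcond1, ha2']; simp
              have hj2 : pvAltInner t n (k + 1) = k + 1 := by
                rw [pvAltInner_eq, if_pos hk1, if_neg (by simp [hcond1'])]
              rw [hj2, htake1,
                  pv_drop_cons t (k + 1) hk1, ← hc',
                  pv_step_conn c' _ _ _ ha1' hconn (by simp),
                  pv_skip c' _ _ _ ha1',
                  pv_drop_cons t (k + 2) hk2, ← hc'',
                  pv_step_break c'' _ _ _ _ ha2' (by simp),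
                  pv_flush_conn (cur ++ [c]) c' out hconn (by simp),
                  pv_skip c'' _ _ _ ha2']
          · -- (d1a) trailing connector at the very end of the text
            have hk2' : n ≤ k + 2 := by omega
            have hnil : t.drop (k + 2) = [] := List.drop_eq_nil_of_le (by omega)
            have hcond1' : pvCond t n (k + 1) = false := by
              rw [hcond1]; simp [Nat.not_lt.mpr hk2']
            have hj2 : pvAltInner t n (k + 1) = k + 1 := by
              rw [pvAltInner_eq, if_pos hk1, if_neg (by simp [hcond1'])]
            rw [hj2, htake1,
                pv_drop_cons t (k + 1) hk1, ← hc',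
                pv_step_conn c' _ _ _ ha1' hconn (by simp),
                pv_skip c' _ _ _ ha1', hnil]
            show pvFlushA (cur ++ [c] ++ [c']) out = pvFlushA [] _
            rw [pv_flush_nil, pv_flush_conn (cur ++ [c]) c' out hconn (by simp)]
        · -- (d2) plain non-letter after the word: A flushes right here
          have hconn' : pvIsConn c' = false := by simpa using hconn
          have hcond1' : pvCond t n (k + 1) = false := by
            rw [hcond1, hconn']; simp
          have hj2 : pvAltInner t n (k + 1) = k + 1 := by
            rw [pvAltInner_eq, if_pos hk1, if_neg (by simp [hcond1'])]
          rw [hj2, htake1,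
              pv_drop_cons t (k + 1) hk1, ← hc',
              pv_step_break c' _ _ _ _ ha1' (by simp [hconn']),
              pv_flush_alpha cur c out (pv_alpha_not_conn c ha),
              pv_skip c' _ _ _ ha1']
    · -- (a) k + 1 = n: the text ends right after this letter
      have hnil : t.drop (k + 1) = [] := List.drop_eq_nil_of_le (by omega)
      have hj2 : pvAltInner t n (k + 1) = k + 1 := by
        rw [pvAltInner_eq, if_neg hk1]
      rw [hj2, htake1, hnil]
      show pvFlushA (cur ++ [c]) out = pvFlushA [] (out ++ [String.mk (cur ++ [c])])
      rw [pv_flush_nil, pv_flush_alpha cur c out (pv_alpha_not_conn c ha)]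

-- the main invariant: with an empty accumulator, A's fold over the suffix from i equals B's outer loop from i
theorem pv_main (t : List Char) : ∀ (fuel i : Nat) (b : Bool) (out : List String),
    t.length - i ≤ fuel → pvLoopA (t.drop i) [] b out = pvAltOuter t t.length i out := by
  intro fuel
  induction fuel with
  | zero =>
    intro i b out hf
    have hnil : t.drop i = [] := List.drop_eq_nil_of_le (by omega)
    rw [hnil, pvAltOuter_eq, if_neg (by omega)]
    show pvFlushA [] out = out
    exact pv_flush_nil out
  | succ m ih =>
    intro i b out hf
    set n := t.length with hn
    by_cases hi : i < n
    · by_cases ha : PySem.Chars.isalpha (t.getD i ' ') = true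
      · have hgt : i < pvAltInner t n i := pvAltInner_gt t n i hi ha
        rw [pv_word t n i (by omega) hi ha [] b out]
        rw [ih (pvAltInner t n i) false (out ++ [String.mk ([] ++ (t.drop i).take (pvAltInner t n i - i))]) (by omega)]
        rw [pvAltOuter_eq t n i, if_pos hi, if_neg (by rw [ha]; simp)]
        simp
      · have ha' : PySem.Chars.isalpha (t.getD i ' ') = false := by simpa using ha
        rw [pv_drop_cons t i hi, pv_skip _ _ _ _ ha', ih (i + 1) false out (by omega)]
        rw [pvAltOuter_eq t n i, if_pos hi, if_pos ha']
    · have hnil : t.drop i = [] := List.drop_eq_nil_of_le (by omega)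
      rw [hnil, pvAltOuter_eq, if_neg hi]
      show pvFlushA [] out = out
      exact pv_flush_nil out

-- ===== VERDICT (by name: the statement is the Claim_ definition above) =====
theorem iter_words_spec : Claim_equal_iter_words := by
  intro text _
  unfold Spec_iter_words iter_words iter_words_alt
  have := pv_main text.toList text.toList.length 0 false [] (by omega)
  simpa using this
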